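-- pv_equiv track=rewrite | github.com/Jarn/jarn.mkrelease | jarn/mkrelease/setuptools.py | _parse_server_response_2017
-- ===== SOURCE A (Python) =====
-- def _parse_server_response_2017(lines, match, then_match):
--     current, expect = '', (match,)
--     for line in lines:
--         if [x for x in expect if line.startswith(x)]:
--             if not current:
--                 current, expect = match, then_match
--             elif current == match:
--                 return True
--     return False
-- ===== SOURCE B (Python) =====
-- def _parse_server_response_2017(lines, match, then_match):
--     it = iter(lines)
--     for line in it:
--         if line.startswith(match):
--             for line in it:
--                 if any(line.startswith(x) for x in then_match):
--                     return True
--             return False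
--     return False
-- ===== Notes on version B (the rewrite author's own statement) =====
-- stated objective: simpler
-- what changed: B replaces A's (current, expect) state-machine over one loop with an explicit phase split: two sequential scans over a single shared iterator (outer scan finds the match line, inner scan looks for a then_match line); dropping the per-line list-comprehension over expect also makes it measurably faster.
-- intended difference: When match is the empty string and some line after the first starts with a then_match prefix, A returns False (its empty 'current' is falsy so it keeps resetting and can never fire the success branch) while B returns True, which is the intended 'match line followed later by then_match line' reading since every line starts with ''. — e.g. on _parse_server_response_2017(["a", "b"], "", ["b"]): A returns false, B returns true
import Mathlib
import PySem

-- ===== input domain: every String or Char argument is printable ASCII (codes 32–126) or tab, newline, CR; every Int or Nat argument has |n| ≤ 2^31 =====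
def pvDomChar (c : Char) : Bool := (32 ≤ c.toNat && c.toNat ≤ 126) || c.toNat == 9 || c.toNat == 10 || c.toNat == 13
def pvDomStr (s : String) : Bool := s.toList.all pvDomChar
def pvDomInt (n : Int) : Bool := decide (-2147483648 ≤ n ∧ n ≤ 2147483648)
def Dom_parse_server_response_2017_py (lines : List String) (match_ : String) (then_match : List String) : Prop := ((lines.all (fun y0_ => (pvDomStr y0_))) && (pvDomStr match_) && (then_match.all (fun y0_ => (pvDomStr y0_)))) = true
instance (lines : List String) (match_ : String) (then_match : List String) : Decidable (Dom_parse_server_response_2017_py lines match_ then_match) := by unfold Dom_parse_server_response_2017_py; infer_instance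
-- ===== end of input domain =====

-- B: two-phase split (outer scan for the match line, then inner scan for a then_match line) instead of A's (current, expect) state machine; objective: simpler.


-- ===== PORT A =====
-- loop over lines carrying state (current, expect), exactly A's branches
def pvAGo (match_ : String) (then_match : List String) :
    List String → String → List String → Bool
  | [], _, _ => false
  | line :: rest, current, expect =>
    if (expect.filter (fun x => PySem.Str.startswith line x)) ≠ [] then
      if current = "" then pvAGo match_ then_match rest match_ then_match
      else if current = match_ then true
      else pvAGo match_ then_match rest current expect
    else pvAGo match_ then_match rest current expect

def parse_server_response_2017_py (lines : List String) (match_ : String) (then_match : List String) : Bool :=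
  pvAGo match_ then_match lines "" [match_]

-- ===== PORT B =====
-- inner phase: rest of the shared iterator, looking for a then_match prefix
def pvBInner (then_match : List String) : List String → Bool
  | [] => false
  | line :: rest =>
    if then_match.any (fun x => PySem.Str.startswith line x) then true
    else pvBInner then_match rest

-- outer phase: looking for the match line, then handing the rest to the inner phase
def pvBOuter (match_ : String) (then_match : List String) : List String → Bool
  | [] => false
  | line :: rest =>
    if PySem.Str.startswith line match_ then pvBInner then_match rest
    else pvBOuter match_ then_match rest

def parse_server_response_2017_py_alt (lines : List String) (match_ : String) (then_match : List String) : Bool :=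
  pvBOuter match_ then_match lines

-- ===== PRECONDITION & SPEC =====
-- When match_ is empty and some line after the first starts with a then_match prefix, A returns
-- false (its empty 'current' is falsy, so it keeps resetting and never fires the success branch)
-- while B returns true, the intended value since every line starts with the empty string.
def D_parse_server_response_2017_py (lines : List String) (match_ : String) (then_match : List String) : Prop :=
  match_ = "" ∧ (lines.drop 1).any (fun l => then_match.any (fun x => PySem.Str.startswith l x)) = true
instance (lines : List String) (match_ : String) (then_match : List String) : Decidable (D_parse_server_response_2017_py lines match_ then_match) := by unfold D_parse_server_response_2017_py; infer_instance

def Spec_parse_server_response_2017_py (lines : List String) (match_ : String) (then_match : List String) (out : Bool) : Prop := ¬ D_parse_server_response_2017_py lines match_ then_match → out = parse_server_response_2017_py_alt lines match_ then_match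
instance (lines : List String) (match_ : String) (then_match : List String) (out : Bool) : Decidable (Spec_parse_server_response_2017_py lines match_ then_match out) := by unfold Spec_parse_server_response_2017_py; infer_instance

def pvDiffWitness_parse_server_response_2017_py : List String × String × List String := (["a", "b"], "", ["b"])
def pvDiffWitnessOut_parse_server_response_2017_py : Bool × Bool := (false, true)

-- ===== CLAIM (what is proved, stated in full; the proofs are below) =====
def Claim_unchanged_parse_server_response_2017_py : Prop := ∀ (lines : List String) (match_ : String) (then_match : List String), Dom_parse_server_response_2017_py lines match_ then_match → Spec_parse_server_response_2017_py lines match_ then_match (parse_server_response_2017_py lines match_ then_match)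
def Claim_changed_parse_server_response_2017_py : Prop := Dom_parse_server_response_2017_py (pvDiffWitness_parse_server_response_2017_py.1) (pvDiffWitness_parse_server_response_2017_py.2.1) (pvDiffWitness_parse_server_response_2017_py.2.2) ∧ D_parse_server_response_2017_py (pvDiffWitness_parse_server_response_2017_py.1) (pvDiffWitness_parse_server_response_2017_py.2.1) (pvDiffWitness_parse_server_response_2017_py.2.2) ∧ parse_server_response_2017_py (pvDiffWitness_parse_server_response_2017_py.1) (pvDiffWitness_parse_server_response_2017_py.2.1) (pvDiffWitness_parse_server_response_2017_py.2.2) = pvDiffWitnessOut_parse_server_response_2017_py.1 ∧ parse_server_response_2017_py_alt (pvDiffWitness_parse_server_response_2017_py.1) (pvDiffWitness_parse_server_response_2017_py.2.1) (pvDiffWitness_parse_server_response_2017_py.2.2) = pvDiffWitnessOut_parse_server_response_2017_py.2 ∧ pvDiffWitnessOut_parse_server_response_2017_py.1 ≠ pvDiffWitnessOut_parse_server_response_2017_py.2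
def Claim_exact_parse_server_response_2017_py : Prop := ∀ (lines : List String) (match_ : String) (then_match : List String), Dom_parse_server_response_2017_py lines match_ then_match → D_parse_server_response_2017_py lines match_ then_match → parse_server_response_2017_py lines match_ then_match ≠ parse_server_response_2017_py_alt lines match_ then_match

-- ===== LEMMAS AND PROOFS =====
-- filter-nonempty condition of A ↔ any
theorem pvFilter_ne_iff_any (line : String) (expect : List String) :
    ((expect.filter (fun x => PySem.Str.startswith line x)) ≠ []) ↔
      expect.any (fun x => PySem.Str.startswith line x) = true := by
  simp [List.filter_eq_nil_iff, List.any_eq_true]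

-- phase 2: with current = match_ ≠ "", A's loop is B's inner scan
theorem pvAGo_phase2 (match_ : String) (then_match : List String) (h : match_ ≠ "") :
    ∀ lines, pvAGo match_ then_match lines match_ then_match = pvBInner then_match lines := by
  intro lines
  induction lines with
  | nil => rfl
  | cons line rest ih =>
    simp only [pvAGo, pvBInner]
    by_cases hany : then_match.any (fun x => PySem.Str.startswith line x) = true
    · have hc := (pvFilter_ne_iff_any line then_match).mpr hany
      rw [if_pos hc, if_neg h, if_pos trivial, if_pos hany]
    · have hc : ¬ ((then_match.filter (fun x => PySem.Str.startswith line x)) ≠ []) := fun hne =>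
        hany ((pvFilter_ne_iff_any line then_match).mp hne)
      rw [if_neg hc, if_neg hany, ih]

-- phase 1: with current = "" and match_ ≠ "", A's loop is B's outer scan
theorem pvAGo_phase1 (match_ : String) (then_match : List String) (h : match_ ≠ "") :
    ∀ lines, pvAGo match_ then_match lines "" [match_] = pvBOuter match_ then_match lines := by
  intro lines
  induction lines with
  | nil => rfl
  | cons line rest ih =>
    simp only [pvAGo, pvBOuter]
    by_cases hs : PySem.Str.startswith line match_ = true
    · have hc : (([match_]).filter (fun x => PySem.Str.startswith line x)) ≠ [] :=
        (pvFilter_ne_iff_any line [match_]).mpr (by simpa using hs)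
      rw [if_pos hc, if_pos trivial, if_pos hs, pvAGo_phase2 match_ then_match h rest]
    · have hc : ¬ ((([match_]).filter (fun x => PySem.Str.startswith line x)) ≠ []) := fun hne => by
        have := (pvFilter_ne_iff_any line [match_]).mp hne
        simp at this
        exact hs this
      rw [if_neg hc, if_neg hs, ih]

-- with match_ = "" A's loop never leaves the resetting state and returns false
theorem pvAGo_empty (then_match : List String) :
    ∀ lines expect, pvAGo "" then_match lines "" expect = false := by
  intro lines
  induction lines with
  | nil => intro expect; rfl
  | cons line rest ih =>
    intro expect
    simp only [pvAGo]
    by_cases hc : (expect.filter (fun x => PySem.Str.startswith line x)) ≠ [] <;> simp [hc, ih]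

-- B's inner scan computes List.any
theorem pvBInner_eq_any (then_match : List String) :
    ∀ lines, pvBInner then_match lines = lines.any (fun l => then_match.any (fun x => PySem.Str.startswith l x)) := by
  intro lines
  induction lines with
  | nil => rfl
  | cons line rest ih =>
    simp only [pvBInner, List.any_cons]
    by_cases hc : then_match.any (fun x => PySem.Str.startswith line x) = true
    · rw [if_pos hc, hc, Bool.true_or]
    · have hc' : then_match.any (fun x => PySem.Str.startswith line x) = false := by
        simpa using hc
      rw [if_neg hc, hc', Bool.false_or, ih]

theorem pv_empty_startswith (l : String) : PySem.Str.startswith l "" = true := by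
  simp [PySem.Str.startswith_eq, PySem.Chars.startswith_iff]

-- B with match_ = "" on a nonempty list runs the inner scan on the tail
theorem pvB_empty (then_match : List String) (line : String) (rest : List String) :
    pvBOuter "" then_match (line :: rest) = pvBInner then_match rest := by
  rw [pvBOuter, pv_empty_startswith]; rfl

-- ===== VERDICT (by name: the statement is the Claim_ definition above) =====
theorem parse_server_response_2017_py_spec : Claim_unchanged_parse_server_response_2017_py := by
  intro lines match_ then_match _ hD
  by_cases h : match_ = ""
  · subst h
    have hA : parse_server_response_2017_py lines "" then_match = false := pvAGo_empty then_match lines [""]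
    have hn : (lines.drop 1).any (fun l => then_match.any (fun x => PySem.Str.startswith l x)) = false := by
      by_contra hcon
      exact hD ⟨rfl, by simpa using hcon⟩
    cases lines with
    | nil => simp [parse_server_response_2017_py, parse_server_response_2017_py_alt, pvAGo, pvBOuter]
    | cons line rest =>
      simp only [List.drop_succ_cons, List.drop_zero] at hn
      have hB : parse_server_response_2017_py_alt (line :: rest) "" then_match = false := by
        show pvBOuter "" then_match (line :: rest) = false
        rw [pvB_empty, pvBInner_eq_any, hn]
      rw [hA, hB]
  · exact pvAGo_phase1 match_ then_match h lines

theorem parse_server_response_2017_py_changed : Claim_changed_parse_server_response_2017_py := by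
  unfold Claim_changed_parse_server_response_2017_py; decide

theorem parse_server_response_2017_py_tight : Claim_exact_parse_server_response_2017_py := by
  intro lines match_ then_match _ hD
  obtain ⟨hm, hany⟩ := hD
  subst hm
  cases lines with
  | nil => simp at hany
  | cons line rest =>
    simp only [List.drop_succ_cons, List.drop_zero] at hany
    have hA : parse_server_response_2017_py (line :: rest) "" then_match = false := pvAGo_empty then_match _ [""]
    have hB : parse_server_response_2017_py_alt (line :: rest) "" then_match = true := by
      show pvBOuter "" then_match (line :: rest) = true
      rw [pvB_empty, pvBInner_eq_any, hany]
    rw [hA, hB]; simp
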